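-- pv_equiv track=rewrite | github.com/jonasbb/python-snippets | python_snippets/domains.py | domain_sort_key
-- ===== SOURCE A (Python) =====
-- def domain_sort_key(domain: str) -> tuple[list[str], bool]:
--     """
--     Create a sort key for a list of domains
--
--     This function converts the `domain` into a sortable key.
--     The keys sort using the "Canonical DNS Name Order" as defined in [RFC 4034](https://datatracker.ietf.org/doc/html/rfc4034#section-6.1).
--
--     # Example
--
--     ```python
--     domains = ['z.example', 'Z.a.example', '*.z.example', 'example', 'a.example']
--     domains.sort(key=python_snippets.domains.domain_sort_key)
--     assert domains == ['example', 'a.example', 'Z.a.example', 'z.example', '*.z.example']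
--     ```
--     """
--
--     labels: list[str] = []
--     is_escaped = False
--     curr_label: list[str] = []
--
--     # Domain sorting happens case insensitive
--     domain = domain.lower()
--
--     # Process labels char by char
--     # Handling escaped internal dots, i.e.,
--     # www.exa\.mple.net -> ["www", "exa.mple", "net"]
--     for c in domain:
--         if is_escaped:
--             if c == ".":
--                 curr_label += c
--                 is_escaped = False
--             else:
--                 raise ValueError("In domains only the `.` character can be escaped.")
--         else:
--             if c == "\\":
--                 is_escaped = True
--             elif c == ".":
--                 labels.append("".join(curr_label))
--                 curr_label = []
--             else:
--                 curr_label.append(c)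
--
--     # Add last label to the list of labels
--     if len(curr_label) > 0:
--         labels.append("".join(curr_label))
--     is_fqdn = len(curr_label) == 0
--
--     # Reverse labels to sort by TLD, SLD, etc
--     labels.reverse()
--
--     return (labels, is_fqdn)
-- ===== SOURCE B (Python) =====
-- def domain_sort_key(domain: str) -> tuple[list[str], bool]:
--     """Split-based re-implementation: decompose on backslashes, validate escapes,
--     then dot-split and glue escaped dots back, instead of a char-by-char state machine."""
--     s = domain.lower()
--     parts = s.split("\\")
--     # a lone trailing backslash escapes nothing and is dropped
--     if len(parts) > 1 and parts[-1] == "":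
--         parts.pop()
--     for p in parts[1:]:
--         if not p.startswith("."):
--             raise ValueError("In domains only the `.` character can be escaped.")
--     pieces = parts[0].split(".")
--     for p in parts[1:]:
--         subs = p[1:].split(".")
--         pieces[-1] += "." + subs[0]
--         pieces.extend(subs[1:])
--     is_fqdn = pieces[-1] == ""
--     if is_fqdn:
--         pieces.pop()
--     pieces.reverse()
--     return (pieces, is_fqdn)
-- ===== Notes on version B (the rewrite author's own statement) =====
-- stated objective: alternative
-- what changed: Replaced A's char-by-char escape state machine with a split-based decomposition: split on backslashes, validate that each escaped character is a dot, dot-split the fragments and glue escaped dots back, then drop the trailing empty label iff the domain is fully qualified.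
import Mathlib
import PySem

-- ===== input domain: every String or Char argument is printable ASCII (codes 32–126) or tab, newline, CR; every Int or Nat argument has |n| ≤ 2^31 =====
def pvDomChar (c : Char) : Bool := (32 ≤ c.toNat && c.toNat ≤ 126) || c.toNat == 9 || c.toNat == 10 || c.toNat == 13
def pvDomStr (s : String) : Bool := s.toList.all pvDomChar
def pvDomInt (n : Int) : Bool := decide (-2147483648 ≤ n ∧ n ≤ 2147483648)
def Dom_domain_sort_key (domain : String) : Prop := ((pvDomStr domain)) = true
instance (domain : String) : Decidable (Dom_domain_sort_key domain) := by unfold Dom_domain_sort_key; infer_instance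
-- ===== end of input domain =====

-- B replaces A's char-by-char escape state machine by a split-based decomposition
-- (split on backslashes, validate escapes, dot-split, glue escaped dots back); objective: alternative.

-- ===== PORT A =====
-- A's char loop: state (labels, is_escaped, curr_label); `none` = the ValueError branch.
def keyLoop : List Char → List String → Bool → List Char → Option (List String × Bool)
  | [], labels, _, curr =>
      some ((if 0 < curr.length then labels ++ [String.ofList curr] else labels).reverse,
            curr.length == 0)
  | c :: rest, labels, esc, curr =>
      if esc then
        if c = '.' then keyLoop rest labels false (curr ++ [c])
        else none  -- raise ValueError (outside Pre_)
      else
        if c = '\\' then keyLoop rest labels true curr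
        else if c = '.' then keyLoop rest (labels ++ [String.ofList curr]) false []
        else keyLoop rest labels false (curr ++ [c])

def domain_sort_key (domain : String) : List String × Bool :=
  (keyLoop (PySem.Chars.lower domain.toList) [] false []).getD ([], true)

-- ===== PORT B =====
-- Source B's glue loop body: pieces[-1] += "." + subs[0]; pieces.extend(subs[1:])  (p[1:] is List.drop 1, index nonnegative)
def altGlue (pieces : List (List Char)) (p : List Char) : List (List Char) :=
  let subs := PySem.Chars.splitOn (List.drop 1 p) ['.']
  (pieces.dropLast ++ [pieces.getLastD [] ++ '.' :: subs.headD []]) ++ List.drop 1 subs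

def domain_sort_key_alt (domain : String) : List String × Bool :=
  let s := PySem.Chars.lower domain.toList
  let parts0 := PySem.Chars.splitOn s ['\\']
  -- a lone trailing backslash escapes nothing and is dropped
  let parts := if 1 < parts0.length && (parts0.getLastD [] == ([] : List Char)) then parts0.dropLast else parts0
  if (List.drop 1 parts).all (fun p => PySem.Chars.startswith p ['.']) then
    let pieces := (List.drop 1 parts).foldl altGlue (PySem.Chars.splitOn (parts.headD []) ['.'])
    let is_fqdn := pieces.getLastD [] == ([] : List Char)
    let pieces := if is_fqdn then pieces.dropLast else pieces
    (pieces.reverse.map (fun x => String.ofList x), is_fqdn)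
  else ([], true)  -- Source B raises ValueError here (outside Pre_)

-- ===== PRECONDITION & SPEC =====
-- Pre_ excludes exactly the inputs on which A raises ValueError: a backslash followed by
-- a character other than '.' (a string-final backslash is fine and stays inside Pre_).
def Pre_domain_sort_key (domain : String) : Prop :=
  ∀ i ∈ List.range domain.toList.length,
    domain.toList[i]? = some '\\' →
      (domain.toList[i+1]? = some '.' ∨ i + 1 = domain.toList.length)
instance (domain : String) : Decidable (Pre_domain_sort_key domain) := by
  unfold Pre_domain_sort_key; infer_instance

def pvWitness_domain_sort_key : String := "www.exa\\.mple.net"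

def Spec_domain_sort_key (domain : String) (out : List String × Bool) : Prop := out = domain_sort_key_alt domain
instance (domain : String) (out : List String × Bool) : Decidable (Spec_domain_sort_key domain out) := by unfold Spec_domain_sort_key; infer_instance

-- ===== CLAIM (what is proved, stated in full; the proofs are below) =====
def Claim_equal_domain_sort_key : Prop := ∀ (domain : String), Dom_domain_sort_key domain → Pre_domain_sort_key domain → Spec_domain_sort_key domain (domain_sort_key domain)

-- ===== LEMMAS AND PROOFS =====

-- decidable char disequalities used to reduce literal `if`s
theorem dot_ne_bs : ¬(('.' : Char) = '\\') := by decide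

-- prepend x to the head piece ([x] if there is none)
def glueL (x : List Char) : List (List Char) → List (List Char)
  | [] => [x]
  | h :: t => (x ++ h) :: t

-- last piece (default [])
def lastP : List (List Char) → List Char
  | [] => []
  | [x] => x
  | _ :: b :: t => lastP (b :: t)

-- single-character splitter (reference form of s.split(sep))
def spc (sep : Char) : List Char → List (List Char)
  | [] => [[]]
  | c :: r => if c = sep then [] :: spc sep r else glueL [c] (spc sep r)

-- reference scan: the label pieces of a valid domain (last piece = the unfinished label)
def refL : List Char → List (List Char)
  | [] => [[]]
  | [c] => if c = '\\' then [[]] else if c = '.' then [[], []] else [[c]]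
  | c :: d :: r =>
    if c = '\\' then (if d = '.' then glueL ['.'] (refL r) else [[]])
    else if c = '.' then [] :: refL (d :: r)
    else glueL [c] (refL (d :: r))

-- valid = every backslash is string-final or followed by '.'
def validB : List Char → Bool
  | [] => true
  | [_] => true
  | c :: d :: r => if c = '\\' then ((d == '.') && validB r) else validB (d :: r)

-- re-attach split parts, each preceded by a backslash
def catBS : List (List Char) → List Char
  | [] => []
  | p :: ps => '\\' :: (p ++ catBS ps)

-- shape of the parts after the first: '.'-initial, a single trailing empty part allowed
def shapeB : List (List Char) → Bool
  | [] => true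
  | [] :: ps => ps.isEmpty
  | (d :: _) :: ps => (d == '.') && shapeB ps

-- the final (labels, is_fqdn) from the completed labels and the last unfinished label
def finishRes (labels : List String) (curr : List Char) : List String × Bool :=
  ((if 0 < curr.length then labels ++ [String.ofList curr] else labels).reverse, curr.length == 0)

def midRes (pieces : List (List Char)) : List String × Bool :=
  finishRes (pieces.dropLast.map (fun x => String.ofList x)) (lastP pieces)

-- ----- basic structure lemmas -----

theorem glueL_ne_nil (x : List Char) (L : List (List Char)) : glueL x L ≠ [] := by
  cases L <;> simp [glueL]

theorem spc_ne_nil (sep : Char) : ∀ l : List Char, spc sep l ≠ []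
  | [] => by simp [spc]
  | c :: r => by by_cases h : c = sep <;> simp [spc, h, glueL_ne_nil]

theorem refL_cons_dot (r : List Char) : refL ('.' :: r) = [] :: refL r := by
  cases r with
  | nil => simp [refL]
  | cons d r' => simp [refL, dot_ne_bs]

theorem refL_bs_dot (r : List Char) : refL ('\\' :: '.' :: r) = glueL ['.'] (refL r) := by
  simp [refL]

theorem refL_cons_ne (c : Char) (r : List Char) (h1 : c ≠ '\\') (h2 : c ≠ '.') :
    refL (c :: r) = glueL [c] (refL r) := by
  cases r with
  | nil => simp [refL, glueL, h1, h2]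
  | cons d r' => simp [refL, h1, h2]

theorem validB_cons_ne (c : Char) (r : List Char) (hc : c ≠ '\\') : validB (c :: r) = validB r := by
  cases r with
  | nil => rfl
  | cons d r' => simp [validB, hc]

theorem spc_cons_self (sep : Char) (r : List Char) : spc sep (sep :: r) = [] :: spc sep r := by
  simp [spc]

theorem spc_cons_ne (sep c : Char) (r : List Char) (h : c ≠ sep) :
    spc sep (c :: r) = glueL [c] (spc sep r) := by
  simp [spc, h]

theorem refL_ne_nil : ∀ l : List Char, refL l ≠ []
  | [] => by simp [refL]
  | [c] => by by_cases h1 : c = '\\' <;> by_cases h2 : c = '.' <;> simp [refL, h1, h2]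
  | c :: d :: r => by
      by_cases h1 : c = '\\'
      · by_cases hd : d = '.' <;> simp [refL, h1, hd, glueL_ne_nil]
      · by_cases h2 : c = '.' <;> simp [refL, h1, h2, glueL_ne_nil]

theorem glueL_nil_of_ne (L : List (List Char)) (h : L ≠ []) : glueL [] L = L := by
  cases L with
  | nil => simp at h
  | cons a t => simp [glueL]

theorem glueL_glueL (x y : List Char) (L : List (List Char)) :
    glueL x (glueL y L) = glueL (x ++ y) L := by
  cases L <;> simp [glueL]

theorem getLastD_eq_lastP : ∀ L : List (List Char), L.getLastD [] = lastP L
  | [] => rfl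
  | [x] => rfl
  | a :: b :: t => by
      rw [show (a :: b :: t : List (List Char)).getLastD [] = (b :: t).getLastD a from rfl,
          show lastP (a :: b :: t) = lastP (b :: t) from rfl,
          ← getLastD_eq_lastP (b :: t)]
      cases t <;> simp [List.getLastD]

theorem lastP_append_cons : ∀ (A : List (List Char)) (b : List Char) (B : List (List Char)),
    lastP (A ++ b :: B) = lastP (b :: B)
  | [], _, _ => rfl
  | a :: A', b, B => by
      rw [List.cons_append]
      obtain ⟨x, t, hxt⟩ := List.exists_cons_of_ne_nil (List.append_ne_nil_of_right_ne_nil A' (by simp : b :: B ≠ []))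
      rw [hxt, show lastP (a :: x :: t) = lastP (x :: t) from rfl, ← hxt]
      exact lastP_append_cons A' b B

theorem lastP_concat (A : List (List Char)) (x : List Char) : lastP (A ++ [x]) = x :=
  lastP_append_cons A x []

theorem dropLast_append_cons (A : List (List Char)) (b : List Char) (B : List (List Char)) :
    (A ++ b :: B).dropLast = A ++ (b :: B).dropLast := by
  induction A with
  | nil => rfl
  | cons a t ih =>
      rw [List.cons_append]
      obtain ⟨x, u, hxu⟩ := List.exists_cons_of_ne_nil (List.append_ne_nil_of_right_ne_nil t (by simp : b :: B ≠ []))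
      rw [hxu, List.dropLast_cons₂, ← hxu, ih, List.cons_append]

theorem dropLast_append_lastP : ∀ (L : List (List Char)), L ≠ [] → L.dropLast ++ [lastP L] = L
  | [], h => absurd rfl h
  | [x], _ => rfl
  | a :: b :: t, _ => by
      rw [List.dropLast_cons₂, show lastP (a :: b :: t) = lastP (b :: t) from rfl, List.cons_append,
          dropLast_append_lastP (b :: t) (by simp)]

theorem catBS_append : ∀ (A B : List (List Char)), catBS (A ++ B) = catBS A ++ catBS B
  | [], _ => rfl
  | p :: A', B => by
      rw [List.cons_append, show catBS (p :: (A' ++ B)) = '\\' :: (p ++ catBS (A' ++ B)) from rfl,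
          show catBS (p :: A') = '\\' :: (p ++ catBS A') from rfl, catBS_append A' B]
      simp

-- ----- A-side: keyLoop computes midRes of refL -----

theorem keyLoop_eq : ∀ l : List Char, validB l = true →
    ∀ (labels : List String) (curr : List Char),
      keyLoop l labels false curr =
        some (finishRes (labels ++ (glueL curr (refL l)).dropLast.map (fun x => String.ofList x))
                        (lastP (glueL curr (refL l))))
  | [], _, labels, curr => by
      rw [show refL [] = [[]] from rfl, show glueL curr [[]] = [curr ++ []] from rfl, List.append_nil,
          show lastP [curr] = curr from rfl, show ([curr] : List (List Char)).dropLast = [] from rfl]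
      simp [keyLoop, finishRes]
  | c :: r, hv, labels, curr => by
      by_cases hbs : c = '\\'
      · subst hbs
        cases r with
        | nil =>
            rw [show refL ['\\'] = [[]] from by simp [refL],
                show glueL curr [[]] = [curr ++ []] from rfl, List.append_nil,
                show lastP [curr] = curr from rfl, show ([curr] : List (List Char)).dropLast = [] from rfl]
            simp [keyLoop, finishRes]
        | cons d r' =>
            have hd : d = '.' ∧ validB r' = true := by
              rw [show validB ('\\' :: d :: r') = ((d == '.') && validB r') from by simp [validB]] at hv
              simpa using hv
            obtain ⟨hd1, hv2⟩ := hd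
            subst hd1
            have step : keyLoop ('\\' :: '.' :: r') labels false curr
                = keyLoop r' labels false (curr ++ ['.']) := by
              simp [keyLoop]
            rw [step, keyLoop_eq r' hv2 labels (curr ++ ['.']), refL_bs_dot, glueL_glueL]
      · by_cases hdot : c = '.'
        · subst hdot
          have hv2 : validB r = true := by
            rw [validB_cons_ne '.' r dot_ne_bs] at hv; exact hv
          obtain ⟨h0, t0, hrt⟩ : ∃ h0 t0, refL r = h0 :: t0 := by
            obtain ⟨a, b, hab⟩ := List.exists_cons_of_ne_nil (refL_ne_nil r)
            exact ⟨a, b, hab⟩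
          have step : keyLoop ('.' :: r) labels false curr
              = keyLoop r (labels ++ [String.ofList curr]) false [] := by
            simp [keyLoop, dot_ne_bs]
          rw [step, keyLoop_eq r hv2 (labels ++ [String.ofList curr]) [], refL_cons_dot, hrt,
              glueL_nil_of_ne _ (by simp),
              show glueL curr ([] :: h0 :: t0) = (curr ++ []) :: h0 :: t0 from rfl, List.append_nil,
              List.dropLast_cons₂, show lastP (curr :: h0 :: t0) = lastP (h0 :: t0) from rfl]
          simp [List.append_assoc]
        · have hv2 : validB r = true := by
            rw [validB_cons_ne c r hbs] at hv; exact hv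
          have step : keyLoop (c :: r) labels false curr
              = keyLoop r labels false (curr ++ [c]) := by
            simp [keyLoop, hbs, hdot]
          rw [step, keyLoop_eq r hv2 labels (curr ++ [c]), refL_cons_ne c r hbs hdot, glueL_glueL]

-- ----- splitOn on a single-character separator is spc -----

theorem go_eq_spc : ∀ (sep : Char) (l : List Char) (fuel : Nat), l.length < fuel →
    ∀ (cur : List Char) (acc : List (List Char)),
      PySem.Chars.splitOn.go [sep] fuel l cur acc = acc.reverse ++ glueL cur.reverse (spc sep l)
  | sep, [], fuel, hf, cur, acc => by
      cases fuel with
      | zero => omega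
      | succ f =>
          rw [PySem.Chars.splitOn.go]
          simp [spc, glueL]
          all_goals omega
  | sep, c :: r, fuel, hf, cur, acc => by
      cases fuel with
      | zero => omega
      | succ f =>
          rw [PySem.Chars.splitOn.go]
          by_cases hc : c = sep
          · subst hc
            have hpre : List.isPrefixOf [c] (c :: r) = true := by simp [List.isPrefixOf]
            rw [if_pos hpre]
            have hrec := go_eq_spc c r f (by simp at hf; omega) [] (cur.reverse :: acc)
            simp only [List.length_cons, List.length_nil, List.drop_succ_cons, List.drop_zero] at hrec ⊢
            rw [hrec, spc_cons_self]
            obtain ⟨h0, t0, hrt⟩ := List.exists_cons_of_ne_nil (spc_ne_nil c r)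
            rw [hrt]
            simp [glueL]
          · have hpre : List.isPrefixOf [sep] (c :: r) = false := by
              simp [List.isPrefixOf]
              exact fun h => absurd h.symm hc
            rw [hpre]
            simp only [Bool.false_eq_true, if_false]
            have hrec := go_eq_spc sep r f (by simp at hf; omega) (c :: cur) acc
            rw [hrec, spc_cons_ne sep c r hc]
            rw [glueL_glueL, List.reverse_cons]

theorem splitOn_eq_spc (sep : Char) (l : List Char) :
    PySem.Chars.splitOn l [sep] = spc sep l := by
  unfold PySem.Chars.splitOn
  rw [go_eq_spc sep l (l.length + 1) (by omega) [] []]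
  simp [glueL_nil_of_ne _ (spc_ne_nil sep l)]

theorem spc_no_sep : ∀ (sep : Char) (l : List Char) (p : List Char), p ∈ spc sep l → sep ∉ p
  | sep, [], p => by intro hp; simp [spc] at hp; subst hp; simp
  | sep, c :: r, p => by
      by_cases hc : c = sep
      · subst hc
        rw [spc_cons_self]
        intro hp
        rcases List.mem_cons.mp hp with h | h
        · subst h; simp
        · exact spc_no_sep c r p h
      · rw [spc_cons_ne sep c r hc]
        obtain ⟨h0, t0, hrt⟩ := List.exists_cons_of_ne_nil (spc_ne_nil sep r)
        rw [hrt]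
        intro hp
        rcases List.mem_cons.mp hp with h | h
        · subst h
          have hh : sep ∉ h0 := spc_no_sep sep r h0 (by rw [hrt]; exact List.mem_cons_self)
          simp [Ne.symm hc, hh]
        · exact spc_no_sep sep r p (by rw [hrt]; exact List.mem_cons_of_mem _ h)

theorem spc_decomp : ∀ l : List Char,
    l = (spc '\\' l).headD [] ++ catBS (List.drop 1 (spc '\\' l))
  | [] => by simp [spc, catBS]
  | c :: r => by
      obtain ⟨h0, t0, hrt⟩ := List.exists_cons_of_ne_nil (spc_ne_nil '\\' r)
      have ih := spc_decomp r
      rw [hrt] at ih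
      simp only [List.headD_cons, List.drop_succ_cons, List.drop_zero] at ih
      by_cases hc : c = '\\'
      · subst hc
        rw [spc_cons_self, hrt]
        show '\\' :: r = [] ++ catBS (h0 :: t0)
        simp only [List.nil_append, show catBS (h0 :: t0) = '\\' :: (h0 ++ catBS t0) from rfl,
          List.cons.injEq]
        exact ⟨trivial, ih⟩
      · rw [spc_cons_ne '\\' c r hc, hrt, show glueL [c] (h0 :: t0) = (c :: h0) :: t0 from rfl]
        show c :: r = (c :: h0) ++ catBS t0
        simp only [List.cons_append, List.cons.injEq]
        exact ⟨trivial, ih⟩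
  termination_by l => l.length
  decreasing_by simp

-- ----- validity transfers -----

theorem validB_append_nobs : ∀ p : List Char, '\\' ∉ p → ∀ rest, validB (p ++ rest) = validB rest
  | [], _, rest => rfl
  | c :: p', hp, rest => by
      have hc : c ≠ '\\' := fun h => hp (h ▸ List.mem_cons_self)
      have hp' : '\\' ∉ p' := fun h => hp (List.mem_cons_of_mem _ h)
      rw [List.cons_append, validB_cons_ne c _ hc]
      exact validB_append_nobs p' hp' rest

theorem validB_cat : ∀ ps : List (List Char), (∀ p ∈ ps, '\\' ∉ p) →
    validB (catBS ps) = shapeB ps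
  | [], _ => rfl
  | p :: ps, hps => by
      have hp : '\\' ∉ p := hps p List.mem_cons_self
      have hps' : ∀ q ∈ ps, '\\' ∉ q := fun q hq => hps q (List.mem_cons_of_mem _ hq)
      cases p with
      | nil =>
          cases ps with
          | nil => simp [catBS, validB, shapeB]
          | cons q qs => simp [catBS, validB, shapeB]
      | cons d p'' =>
          have hp'' : '\\' ∉ p'' := fun h => hp (List.mem_cons_of_mem _ h)
          rw [show catBS ((d :: p'') :: ps) = '\\' :: d :: (p'' ++ catBS ps) from by simp [catBS],
              show validB ('\\' :: d :: (p'' ++ catBS ps)) = ((d == '.') && validB (p'' ++ catBS ps)) from by simp [validB],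
              validB_append_nobs p'' hp'', validB_cat ps hps',
              show shapeB ((d :: p'') :: ps) = ((d == '.') && shapeB ps) from rfl]

-- ----- refL over a backslash-free prefix is dot-splitting -----

theorem ref_nobs : ∀ p : List Char, '\\' ∉ p → ∀ tail,
    refL (p ++ tail) = (spc '.' p).dropLast ++ glueL (lastP (spc '.' p)) (refL tail)
  | [], _, tail => by
      rw [show spc '.' [] = [[]] from rfl, List.nil_append,
          show ([[]] : List (List Char)).dropLast = [] from rfl,
          show lastP [[]] = [] from rfl, List.nil_append,
          glueL_nil_of_ne _ (refL_ne_nil tail)]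
  | c :: p', hp, tail => by
      have hc : c ≠ '\\' := fun h => hp (h ▸ List.mem_cons_self)
      have hp' : '\\' ∉ p' := fun h => hp (List.mem_cons_of_mem _ h)
      have ih := ref_nobs p' hp' tail
      obtain ⟨h0, t0, hrt⟩ := List.exists_cons_of_ne_nil (spc_ne_nil '.' p')
      by_cases hdot : c = '.'
      · subst hdot
        rw [List.cons_append, refL_cons_dot, ih, spc_cons_self, hrt,
            show ([] :: h0 :: t0 : List (List Char)).dropLast = [] :: (h0 :: t0).dropLast from rfl,
            show lastP ([] :: h0 :: t0) = lastP (h0 :: t0) from rfl, List.cons_append]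
      · rw [List.cons_append, refL_cons_ne c _ hc hdot, ih, spc_cons_ne '.' c p' hdot, hrt,
            show glueL [c] (h0 :: t0) = (c :: h0) :: t0 from rfl]
        cases t0 with
        | nil =>
            rw [show ([h0] : List (List Char)).dropLast = [] from rfl,
                show lastP [h0] = h0 from rfl, List.nil_append,
                show ([c :: h0] : List (List Char)).dropLast = [] from rfl,
                show lastP [c :: h0] = c :: h0 from rfl, List.nil_append,
                glueL_glueL, List.singleton_append]
        | cons t1 ts =>
            rw [List.dropLast_cons₂, show lastP (h0 :: t1 :: ts) = lastP (t1 :: ts) from rfl,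
                List.dropLast_cons₂, show lastP ((c :: h0) :: t1 :: ts) = lastP (t1 :: ts) from rfl]
            rfl

theorem ref_snoc_bs : ∀ qs : List (List Char),
    (∀ p ∈ qs, '\\' ∉ p ∧ ∃ p', p = '.' :: p') →
    refL (catBS qs ++ ['\\']) = refL (catBS qs)
  | [], _ => by simp [catBS, refL]
  | q :: qs, hqs => by
      obtain ⟨hbs, p', hp'⟩ := hqs q List.mem_cons_self
      have hqs' : ∀ p ∈ qs, '\\' ∉ p ∧ ∃ p', p = '.' :: p' := fun p hp => hqs p (List.mem_cons_of_mem _ hp)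
      subst hp'
      have hbsp : '\\' ∉ p' := fun h => hbs (List.mem_cons_of_mem _ h)
      rw [show catBS (('.' :: p') :: qs) ++ ['\\'] = '\\' :: '.' :: (p' ++ (catBS qs ++ ['\\'])) from by simp [catBS],
          show catBS (('.' :: p') :: qs) = '\\' :: '.' :: (p' ++ catBS qs) from by simp [catBS],
          refL_bs_dot, refL_bs_dot,
          ref_nobs p' hbsp (catBS qs ++ ['\\']), ref_nobs p' hbsp (catBS qs),
          ref_snoc_bs qs hqs']

-- ----- B-side fold computes refL of the re-attached parts -----

theorem main_fold : ∀ (ps : List (List Char)) (pieces : List (List Char)), pieces ≠ [] →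
    (∀ p ∈ ps, '\\' ∉ p ∧ ∃ p', p = '.' :: p') →
    List.foldl altGlue pieces ps =
      pieces.dropLast ++ glueL (lastP pieces) (refL (catBS ps))
  | [], pieces, hne, _ => by
      rw [List.foldl_nil, show catBS [] = ([] : List Char) from rfl, show refL [] = [[]] from rfl,
          show glueL (lastP pieces) [[]] = [lastP pieces ++ []] from rfl, List.append_nil]
      exact (dropLast_append_lastP pieces hne).symm
  | p :: ps, pieces, hne, hps => by
      obtain ⟨hbs, p'', hp''⟩ := hps p List.mem_cons_self
      have hps' : ∀ q ∈ ps, '\\' ∉ q ∧ ∃ q', q = '.' :: q' := fun q hq => hps q (List.mem_cons_of_mem _ hq)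
      subst hp''
      have hbsp : '\\' ∉ p'' := fun h => hbs (List.mem_cons_of_mem _ h)
      obtain ⟨dh, dt, hD⟩ := List.exists_cons_of_ne_nil (spc_ne_nil '.' p'')
      obtain ⟨r0, rt, hR⟩ := List.exists_cons_of_ne_nil (refL_ne_nil (catBS ps))
      have hglue : altGlue pieces ('.' :: p'')
          = pieces.dropLast ++ (lastP pieces ++ '.' :: dh) :: dt := by
        unfold altGlue
        rw [show List.drop 1 ('.' :: p'') = p'' from rfl, splitOn_eq_spc, hD]
        show (pieces.dropLast ++ [pieces.getLastD [] ++ '.' :: (dh :: dt).headD []]) ++ List.drop 1 (dh :: dt) = _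
        rw [getLastD_eq_lastP, show ((dh :: dt : List (List Char))).headD [] = dh from rfl,
            show List.drop 1 (dh :: dt) = dt from rfl, List.append_assoc, List.singleton_append]
      have ih := main_fold ps (pieces.dropLast ++ (lastP pieces ++ '.' :: dh) :: dt)
        (by simp) hps'
      rw [List.foldl_cons, hglue, ih, dropLast_append_cons, lastP_append_cons,
          show catBS (('.' :: p'') :: ps) = '\\' :: '.' :: (p'' ++ catBS ps) from by simp [catBS],
          refL_bs_dot, ref_nobs p'' hbsp (catBS ps), hD, hR]
      cases dt with
      | nil => simp [glueL, lastP, List.append_assoc]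
      | cons t1 ts => simp [glueL, lastP, List.append_assoc]

-- ----- lowercasing preserves validity -----

theorem isupper_toNat (c : Char) (h : PySem.Chars.isupper c = true) : 65 ≤ c.toNat ∧ c.toNat ≤ 90 := by
  unfold PySem.Chars.isupper at h
  simp only [Bool.and_eq_true, decide_eq_true_eq] at h
  rw [Char.le_def, Char.le_def] at h
  exact ⟨UInt32.le_iff_toNat_le.mp h.1, UInt32.le_iff_toNat_le.mp h.2⟩

theorem lowerChar_eq_iff (c e : Char)
    (he : e.toNat < 65 ∨ (90 < e.toNat ∧ e.toNat < 97) ∨ 122 < e.toNat) :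
    (PySem.Chars.lowerChar c = e) ↔ c = e := by
  unfold PySem.Chars.lowerChar
  by_cases h : PySem.Chars.isupper c = true
  · obtain ⟨h1, h2⟩ := isupper_toNat c h
    rw [if_pos h]
    constructor
    · intro hc
      exfalso
      have hv : (c.toNat + 32).isValidChar := by unfold Nat.isValidChar; omega
      have := congrArg Char.toNat hc
      rw [Char.toNat_ofNat, if_pos hv] at this
      omega
    · intro hc
      exfalso
      have h' : PySem.Chars.isupper e = true := hc ▸ h
      obtain ⟨g1, g2⟩ := isupper_toNat e h'
      omega
  · rw [if_neg h]

theorem lowerChar_fix_bs (c : Char) : (PySem.Chars.lowerChar c = '\\') ↔ c = '\\' :=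
  lowerChar_eq_iff c '\\' (by decide)

theorem lowerChar_fix_dot (c : Char) : (PySem.Chars.lowerChar c = '.') ↔ c = '.' :=
  lowerChar_eq_iff c '.' (by decide)

theorem validB_lower : ∀ l : List Char, validB (List.map PySem.Chars.lowerChar l) = validB l
  | [] => rfl
  | [_] => rfl
  | c :: d :: r => by
      by_cases hbs : c = '\\'
      · subst hbs
        rw [List.map_cons, List.map_cons, show PySem.Chars.lowerChar '\\' = '\\' from by decide,
            show validB ('\\' :: PySem.Chars.lowerChar d :: List.map PySem.Chars.lowerChar r)
              = ((PySem.Chars.lowerChar d == '.') && validB (List.map PySem.Chars.lowerChar r)) from by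
                simp [validB],
            show validB ('\\' :: d :: r) = ((d == '.') && validB r) from by simp [validB],
            validB_lower r]
        congr 1
        by_cases hd : d = '.'
        · subst hd; rw [show PySem.Chars.lowerChar '.' = '.' from by decide]
        · have h1 : PySem.Chars.lowerChar d ≠ '.' := fun h => hd ((lowerChar_fix_dot d).mp h)
          simp [h1, hd]
      · have hlc : PySem.Chars.lowerChar c ≠ '\\' := fun h => hbs ((lowerChar_fix_bs c).mp h)
        rw [List.map_cons, validB_cons_ne _ _ hlc, validB_cons_ne _ _ hbs]
        exact validB_lower (d :: r)

theorem pos_validB : ∀ l : List Char,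
    (∀ i ∈ List.range l.length, l[i]? = some '\\' → (l[i+1]? = some '.' ∨ i + 1 = l.length)) →
    validB l = true
  | [], _ => rfl
  | c :: r, h => by
      by_cases hc : c = '\\'
      · subst hc
        cases r with
        | nil => rfl
        | cons d r' =>
            have h0 := h 0 (by simp) (by simp)
            have hd : d = '.' := by
              rcases h0 with h0 | h0
              · simpa using h0
              · simp at h0
            subst hd
            have hr' : validB r' = true := by
              apply pos_validB r'
              intro i hi hbs
              have := h (i + 2) (by simp at hi ⊢; omega) (by simpa using hbs)
              rcases this with h1 | h1
              · left; simpa using h1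
              · right; simp at h1; omega
            rw [show validB ('\\' :: '.' :: r') = (('.' == '.') && validB r') from by simp [validB], hr']
            rfl
      · have hr : validB r = true := by
          apply pos_validB r
          intro i hi hbs
          have := h (i + 1) (by simp at hi ⊢; omega) (by simpa using hbs)
          rcases this with h1 | h1
          · left; simpa using h1
          · right; simp at h1; omega
        rw [validB_cons_ne c r hc, hr]

-- ----- shape decomposition and the final packaging -----

theorem shape_decomp : ∀ (qs : List (List Char)) (q : List Char), shapeB (qs ++ [q]) = true →
    (∀ p ∈ qs, ∃ p', p = '.' :: p') ∧ (q = [] ∨ ∃ q', q = '.' :: q')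
  | [], q, h => by
      refine ⟨by simp, ?_⟩
      cases q with
      | nil => exact Or.inl rfl
      | cons d q' =>
          have hd : d = '.' := by simpa [shapeB] using h
          exact Or.inr ⟨q', by rw [hd]⟩
  | p :: qs, q, h => by
      cases p with
      | nil => simp [shapeB] at h
      | cons d p'' =>
          rw [List.cons_append, show shapeB ((d :: p'') :: (qs ++ [q])) = ((d == '.') && shapeB (qs ++ [q])) from rfl] at h
          simp only [Bool.and_eq_true, beq_iff_eq] at h
          obtain ⟨hd, hrest⟩ := h
          subst hd
          obtain ⟨h1, h2⟩ := shape_decomp qs q hrest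
          refine ⟨?_, h2⟩
          intro p hp
          rcases List.mem_cons.mp hp with hh | hh
          · exact ⟨p'', hh⟩
          · exact h1 p hh

theorem finalize_eq (pieces : List (List Char)) (h : pieces ≠ []) :
    ((if (lastP pieces == ([] : List Char)) then pieces.dropLast else pieces).reverse.map
        (fun x => String.ofList x),
      (lastP pieces == ([] : List Char))) = midRes pieces := by
  unfold midRes finishRes
  by_cases hl : lastP pieces = []
  · rw [hl]
    simp [List.map_reverse]
  · have hlen : 0 < (lastP pieces).length := by
      cases hE : lastP pieces with
      | nil => exact absurd hE hl
      | cons a b => simp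
    have hb : (lastP pieces == ([] : List Char)) = false := by
      simp [hl]
    rw [hb, if_pos hlen, if_neg (show ¬(false = true) by simp)]
    simp only [Prod.mk.injEq]
    constructor
    · conv_lhs => rw [← dropLast_append_lastP pieces h]
      simp
    · rw [show ((lastP pieces).length == 0) = false from by
        cases hE : lastP pieces with
        | nil => exact absurd hE hl
        | cons a b => simp]

-- ----- B equals midRes ∘ refL on valid input -----

theorem altCore (s : List Char) (hvs : validB s = true) :
    (let parts0 := PySem.Chars.splitOn s ['\\']
     let parts := if 1 < parts0.length && (parts0.getLastD [] == ([] : List Char)) then parts0.dropLast else parts0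
     if (List.drop 1 parts).all (fun p => PySem.Chars.startswith p ['.']) then
       let pieces := (List.drop 1 parts).foldl altGlue (PySem.Chars.splitOn (parts.headD []) ['.'])
       let is_fqdn := pieces.getLastD [] == ([] : List Char)
       let pieces := if is_fqdn then pieces.dropLast else pieces
       (pieces.reverse.map (fun x => String.ofList x), is_fqdn)
     else ([], true)) = midRes (refL s) := by
  obtain ⟨p0, ps, hP⟩ := List.exists_cons_of_ne_nil
    (by rw [splitOn_eq_spc] ; exact spc_ne_nil '\\' s : PySem.Chars.splitOn s ['\\'] ≠ [])
  have hPs : spc '\\' s = p0 :: ps := by rw [← splitOn_eq_spc ('\\') s, hP]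
  have hdecomp : s = p0 ++ catBS ps := by
    have := spc_decomp s
    rw [hPs] at this
    simpa using this
  have hnb : ∀ p ∈ p0 :: ps, '\\' ∉ p := by
    intro p hp
    exact spc_no_sep '\\' s p (by rw [hPs]; exact hp)
  have hnbps : ∀ p ∈ ps, '\\' ∉ p := fun p hp => hnb p (List.mem_cons_of_mem _ hp)
  have hshape : shapeB ps = true := by
    rw [← validB_cat ps hnbps, ← validB_append_nobs p0 (hnb p0 List.mem_cons_self) (catBS ps), ← hdecomp]
    exact hvs
  rcases List.eq_nil_or_concat ps with hps0 | ⟨qs, q, hqq⟩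
  · subst hps0
    have hr : refL s = spc '.' p0 := by
      rw [hdecomp, show catBS [] = ([] : List Char) from rfl, List.append_nil,
          show (p0 : List Char) = p0 ++ [] from (List.append_nil p0).symm,
          ref_nobs p0 (hnb p0 List.mem_cons_self) [], show refL [] = [[]] from rfl,
          show glueL (lastP (spc '.' p0)) [[]] = [lastP (spc '.' p0) ++ []] from rfl, List.append_nil,
          dropLast_append_lastP _ (spc_ne_nil '.' p0)]
      simp
    have hcondL : (1 < ([p0] : List (List Char)).length
        && (lastP [p0] == ([] : List Char))) = false := by simp
    simp only [hP, splitOn_eq_spc, getLastD_eq_lastP]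
    simp only [hcondL, Bool.false_eq_true, reduceIte, List.drop_succ_cons, List.drop_zero,
      List.all_nil, List.headD_cons, List.foldl_nil, ← hr]
    exact finalize_eq (refL s) (refL_ne_nil s)
  · rw [List.concat_eq_append] at hqq
    subst hqq
    obtain ⟨hqsdot, hqcase⟩ := shape_decomp qs q hshape
    have hqsfull : ∀ p ∈ qs, '\\' ∉ p ∧ ∃ p', p = '.' :: p' := by
      intro p hp
      exact ⟨hnbps p (by simp [hp]), hqsdot p hp⟩
    rcases hqcase with hq0 | ⟨q', hq'⟩
    · -- trailing empty part: lone trailing backslash, dropped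
      subst hq0
      have hlastP : lastP (p0 :: (qs ++ [[]])) = [] := by
        rw [show p0 :: (qs ++ [[]]) = (p0 :: qs) ++ [[]] from by simp, lastP_concat]
      have hcond : (1 < (p0 :: (qs ++ [[]]) : List (List Char)).length
          && (lastP (p0 :: (qs ++ [[]])) == ([] : List Char))) = true := by
        rw [hlastP]
        simp
      have hdrop : (p0 :: (qs ++ [[]]) : List (List Char)).dropLast = p0 :: qs := by
        rw [show p0 :: (qs ++ [[]]) = (p0 :: qs) ++ [[]] from by simp, List.dropLast_concat]
      have hall : qs.all (fun p => PySem.Chars.startswith p ['.']) = true := by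
        rw [List.all_eq_true]
        intro p hp
        obtain ⟨p', hp'⟩ := hqsdot p hp
        subst hp'
        simp [PySem.Chars.startswith, List.isPrefixOf]
      have hfold : List.foldl altGlue (spc '.' p0) qs
          = (spc '.' p0).dropLast ++ glueL (lastP (spc '.' p0)) (refL (catBS qs)) :=
        main_fold qs _ (spc_ne_nil '.' p0) hqsfull
      have hr : refL s = (spc '.' p0).dropLast ++ glueL (lastP (spc '.' p0)) (refL (catBS qs)) := by
        rw [hdecomp, ref_nobs p0 (hnb p0 List.mem_cons_self) (catBS (qs ++ [[]])),
            catBS_append, show catBS [[]] = ['\\'] from rfl, ref_snoc_bs qs hqsfull]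
      simp only [hP, splitOn_eq_spc, getLastD_eq_lastP]
      simp only [hcond, reduceIte, hdrop, List.drop_succ_cons, List.drop_zero, hall,
        List.headD_cons, hfold, ← hr]
      exact finalize_eq (refL s) (refL_ne_nil s)
    · -- last part nonempty: no drop
      subst hq'
      have hlastP : lastP (p0 :: (qs ++ ['.' :: q'])) = '.' :: q' := by
        rw [show p0 :: (qs ++ ['.' :: q']) = (p0 :: qs) ++ ['.' :: q'] from by simp, lastP_concat]
      have hcond : (1 < (p0 :: (qs ++ ['.' :: q']) : List (List Char)).length
          && (lastP (p0 :: (qs ++ ['.' :: q'])) == ([] : List Char))) = false := by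
        rw [hlastP]
        simp
      have hfull : ∀ p ∈ qs ++ ['.' :: q'], '\\' ∉ p ∧ ∃ p', p = '.' :: p' := by
        intro p hp
        rcases List.mem_append.mp hp with hh | hh
        · exact hqsfull p hh
        · simp at hh
          subst hh
          exact ⟨hnbps _ (by simp), ⟨q', rfl⟩⟩
      have hall : (qs ++ ['.' :: q']).all (fun p => PySem.Chars.startswith p ['.']) = true := by
        rw [List.all_eq_true]
        intro p hp
        obtain ⟨_, p', hp'⟩ := hfull p hp
        subst hp'
        simp [PySem.Chars.startswith, List.isPrefixOf]
      have hfold : List.foldl altGlue (spc '.' p0) (qs ++ ['.' :: q'])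
          = (spc '.' p0).dropLast ++ glueL (lastP (spc '.' p0)) (refL (catBS (qs ++ ['.' :: q']))) :=
        main_fold (qs ++ ['.' :: q']) _ (spc_ne_nil '.' p0) hfull
      have hr : refL s = (spc '.' p0).dropLast ++ glueL (lastP (spc '.' p0)) (refL (catBS (qs ++ ['.' :: q']))) := by
        rw [hdecomp, ref_nobs p0 (hnb p0 List.mem_cons_self) (catBS (qs ++ ['.' :: q']))]
      simp only [hP, splitOn_eq_spc, getLastD_eq_lastP]
      simp only [hcond, Bool.false_eq_true, reduceIte, List.drop_succ_cons, List.drop_zero, hall,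
        List.headD_cons, hfold, ← hr]
      exact finalize_eq (refL s) (refL_ne_nil s)

theorem alt_eq_midRes (domain : String)
    (hvs : validB (PySem.Chars.lower domain.toList) = true) :
    domain_sort_key_alt domain = midRes (refL (PySem.Chars.lower domain.toList)) :=
  altCore (PySem.Chars.lower domain.toList) hvs

-- ===== VERDICT (by name: the statement is the Claim_ definition above) =====
theorem domain_sort_key_spec : Claim_equal_domain_sort_key := by
  unfold Claim_equal_domain_sort_key
  intro domain hDom hPre
  unfold Spec_domain_sort_key
  have hvl : validB domain.toList = true := pos_validB domain.toList hPre
  have hvs : validB (PySem.Chars.lower domain.toList) = true := by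
    unfold PySem.Chars.lower
    rw [validB_lower]
    exact hvl
  have hA : domain_sort_key domain = midRes (refL (PySem.Chars.lower domain.toList)) := by
    unfold domain_sort_key
    rw [keyLoop_eq _ hvs [] [], glueL_nil_of_ne _ (refL_ne_nil _)]
    rfl
  rw [hA, alt_eq_midRes domain hvs]
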